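-- pv_equiv track=rewrite | github.com/lis19/Social-Network-System | network_functions.py | match_score_with_name
-- ===== SOURCE A (Python) =====
-- from typing import List, Tuple, Dict, TextIO
--
-- def match_score_with_name(names: List[str], name_score: List[Tuple[str, int]]) \
--                           -> List[Tuple[str, int]]:
--     """ Take in a sorted list with only names and returns a new list with
--     respective scores for each name in the same order as the names list.
--
--     >>> match_score_with_name(['Mitchell Pritchett', 'Cameron Tucker', \
-- 'Luke Dunphy', 'Phil Dunphy'], [('Cameron Tucker', 1), ('Luke Dunphy', 1), \
-- ('Phil Dunphy', 1), ('Mitchell Pritchett', 2)])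
--     [('Mitchell Pritchett', 2), ('Cameron Tucker', 1), ('Luke Dunphy', 1), \
-- ('Phil Dunphy', 1)]
--     """
--
--     final_list = []
--
--     for name in names:
--         for t in name_score:
--             if name == t[0]:
--                 final_list.append(t)
--
--     return final_list
-- ===== SOURCE B (Python) =====
-- def match_score_with_name(names, name_score):
--     buckets = {}
--     for t in name_score:
--         buckets.setdefault(t[0], []).append(t)
--     final_list = []
--     for name in names:
--         final_list.extend(buckets.get(name, []))
--     return final_list
-- ===== Notes on version B (the rewrite author's own statement) =====
-- stated objective: faster
-- what changed: Replaced the nested scan of name_score for every name by a dict name->list-of-tuples built in one pass, then a single pass over names.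
import Mathlib
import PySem

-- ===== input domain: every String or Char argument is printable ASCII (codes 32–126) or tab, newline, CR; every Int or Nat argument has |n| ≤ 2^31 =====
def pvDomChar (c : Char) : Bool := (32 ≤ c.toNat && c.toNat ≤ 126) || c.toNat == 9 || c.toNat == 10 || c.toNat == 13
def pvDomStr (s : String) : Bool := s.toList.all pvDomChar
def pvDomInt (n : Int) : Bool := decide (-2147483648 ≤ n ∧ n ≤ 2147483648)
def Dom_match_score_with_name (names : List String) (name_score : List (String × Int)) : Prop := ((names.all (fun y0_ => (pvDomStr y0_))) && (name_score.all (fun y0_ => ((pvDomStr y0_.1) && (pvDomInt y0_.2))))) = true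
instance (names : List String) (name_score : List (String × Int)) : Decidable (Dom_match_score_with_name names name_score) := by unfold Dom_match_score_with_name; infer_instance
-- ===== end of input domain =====

-- B builds a name->tuples dict once and walks names once (O(n+m)) instead of scanning name_score per name.


-- ===== PORT A =====
def match_score_with_name (names : List String) (name_score : List (String × Int)) : List (String × Int) :=
  names.foldl (fun final_list name =>
    name_score.foldl (fun acc t => if name == t.1 then acc ++ [t] else acc) final_list) []

-- ===== PORT B =====
def match_score_with_name_alt (names : List String) (name_score : List (String × Int)) : List (String × Int) :=
  let buckets := name_score.foldl
    (fun d t => d.modify t.1 [] (fun l => l ++ [t])) PySem.Dict.empty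
  names.foldl (fun final_list name => final_list ++ buckets.getD name []) []

-- ===== PRECONDITION & SPEC =====
def Spec_match_score_with_name (names : List String) (name_score : List (String × Int)) (out : List (String × Int)) : Prop := out = match_score_with_name_alt names name_score
instance (names : List String) (name_score : List (String × Int)) (out : List (String × Int)) : Decidable (Spec_match_score_with_name names name_score out) := by unfold Spec_match_score_with_name; infer_instance

-- ===== CLAIM (what is proved, stated in full; the proofs are below) =====
def Claim_equal_match_score_with_name : Prop := ∀ (names : List String) (name_score : List (String × Int)), Dom_match_score_with_name names name_score → Spec_match_score_with_name names name_score (match_score_with_name names name_score)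

-- ===== LEMMAS AND PROOFS =====


-- ===== VERDICT (by name: the statement is the Claim_ definition above) =====
-- B's grouping loop appends each tuple to its name's bucket; the bucket for c is the filter of name_score.
theorem getD_group (l : List (String × Int)) (d : PySem.Dict String (List (String × Int))) (c : String) :
    (l.foldl (fun d t => d.modify t.1 [] (fun v => v ++ [t])) d).getD c [] =
      d.getD c [] ++ l.filter (fun t => c == t.1) := by
  induction l generalizing d with
  | nil => simp
  | cons t l ih =>
    simp only [List.foldl_cons, ih, List.filter_cons, PySem.Dict.getD_modify]
    by_cases h : c = t.1
    · simp [h]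
    · simp [h]

theorem match_score_with_name_spec : Claim_equal_match_score_with_name := by
  intro names name_score _
  unfold Spec_match_score_with_name match_score_with_name match_score_with_name_alt
  simp only []
  have hf : (fun (acc : List (String × Int)) (name : String) =>
      name_score.foldl (fun acc t => if name == t.1 then acc ++ [t] else acc) acc)
      = (fun acc name => acc ++
          (name_score.foldl (fun d t => d.modify t.1 [] (fun v => v ++ [t])) PySem.Dict.empty).getD name []) := by
    funext acc name
    rw [PySem.List.foldl_append_if_eq_filter, getD_group]
    simp
  rw [hf]
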